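-- pv_equiv track=rewrite | github.com/EdNawrocki/ScrabbleBot | classes/Anagrammer.py | GetAlphagrams
-- ===== SOURCE A (Python) =====
-- def GetAlphagrams(s, l, i, current):
--     if len(current) == l:
--         return [current]
--     if i >= len(s):
--         return []
--     #Don't take current letter
--     nt = GetAlphagrams(s, l, i+1, current)
--     t = GetAlphagrams(s, l, i+1, current+s[i])
--     return nt + t
-- ===== SOURCE B (Python) =====
-- def GetAlphagrams(s, l, i, current):
--     # DP over the suffix s[i:], processed right to left: dp[j] holds the
--     # j-letter subsequences of the processed suffix in lexicographic
--     # (combination) order; A emits them in exactly the reverse order.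
--     t = s[i:]
--     k = l - len(current)
--     if k < 0 or k > len(t):
--         return []
--     dp = [[""]] + [[] for _ in range(k)]
--     for c in reversed(t):
--         for j in range(k, 0, -1):
--             dp[j] = [c + u for u in dp[j - 1]] + dp[j]
--     return [current + u for u in reversed(dp[k])]
-- ===== Notes on version B (the rewrite author's own statement) =====
-- stated objective: alternative
-- what changed: Replaces A's binary take/skip recursion (exponential call tree with list concatenations at every node) by an iterative dynamic-programming pass over the suffix s[i:]: a table dp[j] of the j-letter subsequences in lexicographic order is built right-to-left in one loop, and the answer is current prefixed to reversed(dp[k]) since A emits combinations in exactly reverse lexicographic order.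
-- outside the precondition, e.g. on GetAlphagrams('ab', 1, -1, ''): A returns ['b', 'a', 'b'], B returns ['b']
import Mathlib
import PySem

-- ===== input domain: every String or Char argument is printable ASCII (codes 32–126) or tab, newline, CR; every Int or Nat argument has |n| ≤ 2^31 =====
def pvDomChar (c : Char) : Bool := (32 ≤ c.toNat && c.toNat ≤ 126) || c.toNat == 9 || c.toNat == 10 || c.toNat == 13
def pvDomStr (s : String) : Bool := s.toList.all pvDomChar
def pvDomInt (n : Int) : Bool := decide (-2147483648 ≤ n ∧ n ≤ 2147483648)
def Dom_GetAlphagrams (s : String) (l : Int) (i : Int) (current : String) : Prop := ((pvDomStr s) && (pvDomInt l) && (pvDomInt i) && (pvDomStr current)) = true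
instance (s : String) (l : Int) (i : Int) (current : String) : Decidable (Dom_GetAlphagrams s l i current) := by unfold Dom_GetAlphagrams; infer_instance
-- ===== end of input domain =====

-- B replaces A's take/skip recursion by an iterative right-to-left DP table of
-- lexicographically ordered combinations, reversed at the end (alternative algorithm, same results).


-- ===== PORT A =====
-- strings are carried as List Char (PySem.Chars convention); String.mk rebuilds the result
def goA (sc : List Char) (l : Int) (i : Int) (cur : List Char) : List String :=
  if (cur.length : Int) = l then [String.mk cur]
  else if _h2 : (sc.length : Int) ≤ i then []
  else
    match PySem.List.pyGet? sc i with
    | none => []   -- Python raises IndexError here (i < -len(s)); outside Pre_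
    | some c => goA sc l (i+1) cur ++ goA sc l (i+1) (cur ++ [c])
termination_by ((sc.length : Int) - i).toNat
decreasing_by all_goals omega

def GetAlphagrams (s : String) (l : Int) (i : Int) (current : String) : List String :=
  goA s.toList l i current.toList

-- ===== PORT B =====
-- inner loop 'for j in range(k, 0, -1): dp[j] = [c + u for u in dp[j-1]] + dp[j]'
-- (dp[j], dp[j-1] are always in range: 1 ≤ j ≤ k < len(dp), so getD/set are exact here)
def stepB (k : Int) (c : Char) (dp : List (List (List Char))) : List (List (List Char)) :=
  (PySem.List.pyRange k 0 (-1)).foldl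
    (fun dp j =>
      dp.set j.toNat (((dp.getD (j-1).toNat []).map (fun u => c :: u)) ++ dp.getD j.toNat [])) dp

def GetAlphagrams_alt (s : String) (l : Int) (i : Int) (current : String) : List String :=
  let t := PySem.List.slice s.toList (some i) none          -- s[i:]
  let k : Int := l - (current.toList.length : Int)
  if k < 0 ∨ (t.length : Int) < k then []
  else
    let dp0 := [[([] : List Char)]] ++ List.replicate k.toNat ([] : List (List Char))
    let dp := t.reverse.foldl (fun dp c => stepB k c dp) dp0
    ((dp.getD k.toNat []).reverse).map (fun u => String.mk (current.toList ++ u))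

-- ===== PRECONDITION & SPEC =====
-- Pre_ excludes negative i except when len(current) == l: there A either raises IndexError
-- (i < -len(s)) or, by Python negative-indexing wraparound, consumes s[i..-1] and then
-- re-traverses the whole string — an accident of the index arithmetic that no caller relies on —
-- while B reads s[i:] as a plain suffix.
def Pre_GetAlphagrams (s : String) (l : Int) (i : Int) (current : String) : Prop :=
  0 ≤ i ∨ (current.toList.length : Int) = l
instance (s : String) (l : Int) (i : Int) (current : String) : Decidable (Pre_GetAlphagrams s l i current) := by unfold Pre_GetAlphagrams; infer_instance
def pvWitness_GetAlphagrams : String × Int × Int × String := ("abc", 2, 0, "")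

def Spec_GetAlphagrams (s : String) (l : Int) (i : Int) (current : String) (out : List String) : Prop := out = GetAlphagrams_alt s l i current
instance (s : String) (l : Int) (i : Int) (current : String) (out : List String) : Decidable (Spec_GetAlphagrams s l i current out) := by unfold Spec_GetAlphagrams; infer_instance

-- ===== CLAIM (what is proved, stated in full; the proofs are below) =====
def Claim_equal_GetAlphagrams : Prop := ∀ (s : String) (l : Int) (i : Int) (current : String), Dom_GetAlphagrams s l i current → Pre_GetAlphagrams s l i current → Spec_GetAlphagrams s l i current (GetAlphagrams s l i current)
-- ===== LEMMAS AND PROOFS =====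

-- the k-letter subsequences of a character list, in lexicographic (itertools.combinations) order
def lexC : List Char → Nat → List (List Char)
  | _, 0 => [[]]
  | [], _ + 1 => []
  | c :: r, j + 1 => (lexC r j).map (fun u => c :: u) ++ lexC r (j + 1)

def dpTable (t : List Char) (k : Nat) : List (List (List Char)) :=
  (List.range (k + 1)).map (fun j => lexC t j)

lemma lexC_zero (t : List Char) : lexC t 0 = [[]] := by
  cases t <;> rfl

-- A never reaches len(current) == l when current is already longer: it returns []
lemma goA_of_long (sc : List Char) (l : Int) :
    ∀ (n : Nat) (i : Int) (cur : List Char), ((sc.length : Int) - i).toNat ≤ n →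
      l < (cur.length : Int) → goA sc l i cur = [] := by
  intro n
  induction n with
  | zero =>
    intro i cur hn hl
    rw [goA]
    rw [if_neg (by omega), dif_pos (by omega)]
  | succ n ih =>
    intro i cur hn hl
    rw [goA]
    rw [if_neg (by omega)]
    by_cases h2 : (sc.length : Int) ≤ i
    · rw [dif_pos h2]
    · rw [dif_neg h2]
      cases hg : PySem.List.pyGet? sc i with
      | none => rfl
      | some c =>
        have h1 : goA sc l (i+1) cur = [] := ih (i+1) cur (by omega) hl
        have hlen : ((cur ++ [c]).length : Int) = (cur.length : Int) + 1 := by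
          simp
        have h2' : goA sc l (i+1) (cur ++ [c]) = [] := ih (i+1) (cur ++ [c]) (by omega) (by omega)
        simp [h1, h2']

-- the heart of the A-side: A's recursion lists current ++ u for the k-combinations u of
-- the suffix, in reverse lexicographic order
lemma goA_lex (sc : List Char) (l : Int) :
    ∀ (n : Nat) (i : Int) (cur : List Char) (k : Nat), ((sc.length : Int) - i).toNat ≤ n →
      0 ≤ i → l = (cur.length : Int) + k →
      goA sc l i cur = ((lexC (sc.drop i.toNat) k).reverse).map (fun u => String.mk (cur ++ u)) := by
  intro n
  induction n with
  | zero =>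
    intro i cur k hn hi hl
    have hdrop : sc.drop i.toNat = [] := by
      apply List.drop_eq_nil_of_le; omega
    rw [goA, hdrop]
    cases k with
    | zero => rw [if_pos (by omega)]; simp [lexC]
    | succ j => rw [if_neg (by omega), dif_pos (by omega)]; simp [lexC]
  | succ n ih =>
    intro i cur k hn hi hl
    cases k with
    | zero =>
      rw [goA, if_pos (by omega)]
      simp [lexC_zero]
    | succ j =>
      rw [goA, if_neg (by omega)]
      by_cases h2 : (sc.length : Int) ≤ i
      · rw [dif_pos h2]
        have hdrop : sc.drop i.toNat = [] := by
          apply List.drop_eq_nil_of_le; omega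
        rw [hdrop]; simp [lexC]
      · rw [dif_neg h2]
        have hilt : i < (sc.length : Int) := by omega
        have hnat : i.toNat < sc.length := by omega
        rw [PySem.List.pyGet?_eq_some_getElem sc hi hilt]
        have hdrop : sc.drop i.toNat = sc[i.toNat] :: sc.drop (i.toNat + 1) :=
          (List.getElem_cons_drop hnat).symm
        have hsucc : (i + 1).toNat = i.toNat + 1 := by omega
        have h1 : goA sc l (i+1) cur =
            ((lexC (sc.drop (i.toNat + 1)) (j+1)).reverse).map (fun u => String.mk (cur ++ u)) := by
          rw [ih (i+1) cur (j+1) (by omega) (by omega) hl, hsucc]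
        have h2' : goA sc l (i+1) (cur ++ [sc[i.toNat]]) =
            ((lexC (sc.drop (i.toNat + 1)) j).reverse).map
              (fun u => String.mk ((cur ++ [sc[i.toNat]]) ++ u)) := by
          rw [ih (i+1) (cur ++ [sc[i.toNat]]) j (by omega) (by omega) (by simp; omega), hsucc]
        dsimp only
        rw [h1, h2', hdrop]
        simp [lexC, List.reverse_append, List.map_append, List.map_map, Function.comp,
          List.append_assoc]

lemma dpTable_length (t : List Char) (k : Nat) : (dpTable t k).length = k + 1 := by
  simp [dpTable]

lemma dpTable_getD (t : List Char) (k j : Nat) (h : j ≤ k) :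
    (dpTable t k).getD j [] = lexC t j := by
  rw [List.getD_eq_getElem _ _ (by simp [dpTable]; omega)]
  simp [dpTable]

-- range(k, 0, -1) peels its first element
lemma pyRange_negone_cons (k : Int) (h : 1 ≤ k) :
    PySem.List.pyRange k 0 (-1) = k :: PySem.List.pyRange (k-1) 0 (-1) := by
  simp only [PySem.List.pyRange]
  norm_num
  by_cases hk1 : (1 : Int) < k
  · have h0k : (0 : Int) < k := by omega
    simp only [hk1, h0k, if_true]
    obtain ⟨m, hm⟩ : ∃ m, k.toNat = m + 1 := ⟨k.toNat - 1, by omega⟩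
    rw [hm]
    simp only [Nat.add_sub_cancel, List.range_succ_eq_map, List.map_cons, List.map_map]
    congr 1
    · norm_num
    · apply List.map_congr_left
      intro a _
      simp only [Function.comp_apply]
      push_cast
      ring
  · have hk2 : k = 1 := by omega
    subst hk2
    norm_num

-- one execution of B's inner loop turns the table for suffix r into the table for c :: r
lemma stepB_inner (c : Char) (k : Nat) (r : List Char) :
    ∀ (m : Nat), m ≤ k → ∀ (D : List (List (List Char))), D.length = k + 1 →
      (∀ j : Nat, j ≤ m → D.getD j [] = lexC r j) →
      (∀ j : Nat, m < j → j ≤ k → D.getD j [] = lexC (c :: r) j) →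
      (PySem.List.pyRange (m : Int) 0 (-1)).foldl
        (fun dp j =>
          dp.set j.toNat (((dp.getD (j-1).toNat []).map (fun u => c :: u)) ++ dp.getD j.toNat []))
        D = dpTable (c :: r) k := by
  intro m
  induction m with
  | zero =>
    intro _ D hlen hlo hhi
    simp only [Nat.cast_zero]
    have hr0 : PySem.List.pyRange (0 : Int) 0 (-1) = [] := by decide
    rw [hr0]
    simp only [List.foldl_nil]
    apply List.ext_getElem
    · simp [dpTable, hlen]
    · intro j hj hj'
      have hjk : j ≤ k := by simp [dpTable] at hj'; omega
      rw [← List.getD_eq_getElem D [] (by omega), ← List.getD_eq_getElem (dpTable (c :: r) k) [] (by rw [dpTable_length]; omega)]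
      rw [dpTable_getD _ _ _ hjk]
      rcases Nat.eq_zero_or_pos j with h0 | hpos
      · subst h0; rw [hlo 0 (by omega)]; simp [lexC_zero]
      · exact hhi j hpos hjk
  | succ m ihm =>
    intro hm D hlen hlo hhi
    rw [pyRange_negone_cons _ (by exact_mod_cast Nat.succ_le_succ (Nat.zero_le m))]
    have hsub : ((m + 1 : Nat) : Int) - 1 = (m : Int) := by push_cast; ring
    simp only [List.foldl_cons, hsub, Int.toNat_natCast]
    have hD' : D.set (m + 1) (((D.getD m []).map (fun u => c :: u)) ++ D.getD (m + 1) [])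
        = D.set (m + 1) (lexC (c :: r) (m + 1)) := by
      rw [hlo m (by omega), hlo (m + 1) (by omega)]
      rfl
    rw [hD']
    apply ihm (by omega)
    · simp [hlen]
    · intro j hj
      rw [List.getD_eq_getElem _ _ (by simp [hlen]; omega),
          List.getElem_set_ne (by omega), ← List.getD_eq_getElem D [] (by omega)]
      exact hlo j (by omega)
    · intro j hj hjk
      by_cases hjm : j = m + 1
      · subst hjm
        rw [List.getD_eq_getElem _ _ (by simp [hlen]; omega),
            List.getElem_set_self (by simp [hlen]; omega)]
      · rw [List.getD_eq_getElem _ _ (by simp [hlen]; omega),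
            List.getElem_set_ne (by omega), ← List.getD_eq_getElem D [] (by omega)]
        exact hhi j (by omega) hjk

lemma dpTable_nil (k : Nat) :
    dpTable [] k = [[([] : List Char)]] ++ List.replicate k ([] : List (List Char)) := by
  induction k with
  | zero => rfl
  | succ k ih =>
    simp only [dpTable, List.range_succ, List.map_append, List.map_cons, List.map_nil] at *
    rw [ih]
    simp [List.replicate_succ' (n := k)]
    rfl

lemma lexC_eq_nil (t : List Char) (k : Nat) (h : t.length < k) : lexC t k = [] := by
  induction t generalizing k with
  | nil => cases k with | zero => omega | succ j => rfl
  | cons c r ih =>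
    cases k with
    | zero => omega
    | succ j =>
      simp only [List.length_cons] at h
      rw [lexC, ih j (by omega), ih (j+1) (by omega)]
      rfl

lemma fold_dpTable (k : Nat) (t : List Char) :
    (t.reverse).foldl (fun dp c => stepB (k : Int) c dp)
      ([[([] : List Char)]] ++ List.replicate k ([] : List (List Char))) = dpTable t k := by
  rw [List.foldl_reverse, ← dpTable_nil]
  induction t with
  | nil => rfl
  | cons c r ih =>
    simp only [List.foldr_cons, ih]
    unfold stepB
    exact stepB_inner c k r k (le_refl k) (dpTable r k) (dpTable_length r k)
      (fun j hj => dpTable_getD r k j hj) (fun j hj hjk => by omega)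

-- ===== VERDICT (by name: the statement is the Claim_ definition above) =====
theorem GetAlphagrams_spec : Claim_equal_GetAlphagrams := by
  intro s l i current _hdom hpre
  unfold Spec_GetAlphagrams GetAlphagrams GetAlphagrams_alt
  set sc := s.toList
  set cur := current.toList
  set t := PySem.List.slice sc (some i) none with ht
  by_cases hc : l - (cur.length : Int) < 0 ∨ (t.length : Int) < l - (cur.length : Int)
  · rw [if_pos hc]
    rcases hc with hk | hbig
    · exact goA_of_long sc l (((sc.length : Int) - i).toNat) i cur (le_refl _) (by omega)
    · -- 0 ≤ k but k exceeds the suffix length: no combinations, A returns []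
      by_cases hk : l - (cur.length : Int) < 0
      · exact goA_of_long sc l (((sc.length : Int) - i).toNat) i cur (le_refl _) (by omega)
      · obtain ⟨k, hk2⟩ : ∃ k : Nat, l - (cur.length : Int) = (k : Int) :=
          ⟨(l - (cur.length : Int)).toNat, by omega⟩
        have hi : 0 ≤ i := by
          rcases hpre with hi | hcl
          · exact hi
          · exfalso
            have hcl' : (cur.length : Int) = l := hcl
            have : (0:Int) ≤ (t.length : Int) := by positivity
            omega
        rw [goA_lex sc l (((sc.length : Int) - i).toNat) i cur k (le_refl _) hi (by omega)]
        rw [← PySem.List.slice_from sc hi, ← ht, lexC_eq_nil t k (by omega)]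
        rfl
  · rw [if_neg hc]
    obtain ⟨k, hk2⟩ : ∃ k : Nat, l - (cur.length : Int) = (k : Int) :=
      ⟨(l - (cur.length : Int)).toNat, by omega⟩
    rw [hk2]
    simp only [Int.toNat_natCast]
    rw [fold_dpTable k t, dpTable_getD _ _ _ (le_refl k)]
    have hlk : l = (cur.length : Int) + k := by omega
    rcases hpre with hi | hcl
    · rw [ht, PySem.List.slice_from sc hi]
      rw [goA_lex sc l (((sc.length : Int) - i).toNat) i cur k (le_refl _) hi hlk]
    · -- len(current) == l: k = 0, both sides are [current], whatever the slice is
      have hcl' : (cur.length : Int) = l := hcl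
      have hk0 : k = 0 := by omega
      subst hk0
      rw [lexC_zero]
      rw [goA, if_pos hcl']
      simp
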